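-- pv_equiv track=rewrite | github.com/fstill12/nical | baru.py | generate_progression
-- ===== SOURCE A (Python) =====
-- NOTE_LIST_SHARP = ['C', 'C#', 'D', 'D#', 'E', 'F', 'F#', 'G', 'G#', 'A', 'A#', 'B']
--
-- NOTE_LIST_FLAT =  ['C', 'Db', 'D', 'Eb', 'E', 'F', 'Gb', 'G', 'Ab', 'A', 'Bb', 'B']
--
-- ROMAN_NUMERALS = {
--     "I": 0, "II": 2, "III": 4, "IV": 5, "V": 7, "VI": 9, "VII": 11
-- }
--
-- CHORDS_MAJOR = ["mayor", "minor", "minor", "mayor", "mayor", "minor", "diminished"]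
--
-- def generate_progression(key, pattern, use_sharp=True):
--     note_list = NOTE_LIST_SHARP if use_sharp else NOTE_LIST_FLAT
--     if key not in note_list:
--         return [f"Key '{key}' tidak valid"]
--
--     idx = note_list.index(key)
--     scale = [(note_list[(idx + x) % 12]) for x in [0, 2, 4, 5, 7, 9, 11]]
--
--     result = []
--     for roman in pattern.upper().split('-'):
--         if roman in ROMAN_NUMERALS:
--             posisi = list(ROMAN_NUMERALS.keys()).index(roman)
--             chord = scale[posisi] + f" ({CHORDS_MAJOR[posisi]})"
--             result.append(chord)
--         else:
--             result.append(f"? ({roman})")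
--     return result
-- ===== SOURCE B (Python) =====
-- NOTE_LIST_SHARP = ['C', 'C#', 'D', 'D#', 'E', 'F', 'F#', 'G', 'G#', 'A', 'A#', 'B']
--
-- NOTE_LIST_FLAT =  ['C', 'Db', 'D', 'Eb', 'E', 'F', 'Gb', 'G', 'Ab', 'A', 'Bb', 'B']
--
-- # roman numeral -> (semitone offset from the key, chord quality)
-- DEGREES = {
--     "I": (0, "mayor"), "II": (2, "minor"), "III": (4, "minor"),
--     "IV": (5, "mayor"), "V": (7, "mayor"), "VI": (9, "minor"),
--     "VII": (11, "diminished"),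
-- }
--
--
-- def _chord(note_list, idx, roman):
--     deg = DEGREES.get(roman)
--     if deg is None:
--         return f"? ({roman})"
--     offset, quality = deg
--     return f"{note_list[(idx + offset) % 12]} ({quality})"
--
--
-- def generate_progression(key, pattern, use_sharp=True):
--     # One character-level scan: no upper()-then-split staging, no scale table.
--     # Tokens are uppercased as they are built and a chord is emitted the
--     # moment a '-' (or the end of the pattern) closes a token.
--     note_list = NOTE_LIST_SHARP if use_sharp else NOTE_LIST_FLAT
--     if key not in note_list:
--         return [f"Key '{key}' tidak valid"]
--
--     idx = note_list.index(key)
--     result = []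
--     token = ""
--     for ch in pattern:
--         if ch == '-':
--             result.append(_chord(note_list, idx, token))
--             token = ""
--         else:
--             token += ch.upper()
--     result.append(_chord(note_list, idx, token))
--     return result
-- ===== Notes on version B (the rewrite author's own statement) =====
-- stated objective: alternative
-- what changed: A stages the work as upper()-then-split('-')-then a token loop over a precomputed scale with list(dict.keys()).index scans; B makes a single character-level pass over the raw pattern, uppercasing characters as it builds each token and emitting the chord (computed directly from a roman->(offset,quality) table) the moment a '-' or the end of the string closes the token.
import Mathlib
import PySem

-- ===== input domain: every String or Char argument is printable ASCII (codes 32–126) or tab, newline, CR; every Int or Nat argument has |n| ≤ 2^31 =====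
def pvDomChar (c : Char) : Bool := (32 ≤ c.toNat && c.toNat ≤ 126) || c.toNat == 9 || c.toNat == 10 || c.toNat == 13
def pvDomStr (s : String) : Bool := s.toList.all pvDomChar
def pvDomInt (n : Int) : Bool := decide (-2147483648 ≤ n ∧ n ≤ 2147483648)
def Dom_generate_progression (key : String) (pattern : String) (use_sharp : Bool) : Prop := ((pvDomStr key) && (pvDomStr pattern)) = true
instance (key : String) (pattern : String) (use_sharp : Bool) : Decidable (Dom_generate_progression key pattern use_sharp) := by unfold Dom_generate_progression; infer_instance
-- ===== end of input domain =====

-- B replaces A's upper()-then-split staging and precomputed scale with a single character-level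
-- scan of the pattern that builds tokens and emits chords on the fly; objective: alternative
-- decomposition (no speed claim).

-- ===== PORT A =====
-- module constants shared by both Pythons
def NOTE_LIST_SHARP : List String := ["C", "C#", "D", "D#", "E", "F", "F#", "G", "G#", "A", "A#", "B"]
def NOTE_LIST_FLAT : List String := ["C", "Db", "D", "Eb", "E", "F", "Gb", "G", "Ab", "A", "Bb", "B"]
-- A's constants
def ROMAN_NUMERALS : PySem.Dict String Int :=
  PySem.Dict.ofList [("I", 0), ("II", 2), ("III", 4), ("IV", 5), ("V", 7), ("VI", 9), ("VII", 11)]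
def CHORDS_MAJOR : List String := ["mayor", "minor", "minor", "mayor", "mayor", "minor", "diminished"]

def generate_progression (key : String) (pattern : String) (use_sharp : Bool) : List String :=
  let note_list := if use_sharp then NOTE_LIST_SHARP else NOTE_LIST_FLAT
  if !(note_list.contains key) then ["Key '" ++ key ++ "' tidak valid"]
  else
    let idx : Int := ((PySem.List.index? note_list key).getD 0 : Nat)
    let scale := ([0, 2, 4, 5, 7, 9, 11] : List Int).map
      (fun x => PySem.List.pyGetD note_list (PySem.Int.mod (idx + x) 12) "")
    ((PySem.Str.split? (PySem.Str.upper pattern) "-").getD []).foldl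
      (fun result roman =>
        if ROMAN_NUMERALS.contains roman then
          let posisi : Int := ((PySem.List.index? ROMAN_NUMERALS.keys roman).getD 0 : Nat)
          let chord := PySem.List.pyGetD scale posisi "" ++ (" (" ++ PySem.List.pyGetD CHORDS_MAJOR posisi "" ++ ")")
          result ++ [chord]
        else result ++ ["? (" ++ roman ++ ")"]) []

-- ===== PORT B =====
-- B's table: roman numeral -> (semitone offset, chord quality)
def DEGREES : PySem.Dict String (Int × String) :=
  PySem.Dict.ofList [("I", (0, "mayor")), ("II", (2, "minor")), ("III", (4, "minor")),
    ("IV", (5, "mayor")), ("V", (7, "mayor")), ("VI", (9, "minor")), ("VII", (11, "diminished"))]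

-- B's _chord helper
def chordOf (note_list : List String) (idx : Int) (roman : String) : String :=
  match DEGREES.get? roman with
  | none => "? (" ++ roman ++ ")"
  | some (offset, quality) =>
      PySem.List.pyGetD note_list (PySem.Int.mod (idx + offset) 12) "" ++ (" (" ++ quality ++ ")")

-- B's for-loop over the pattern's characters, plus the trailing append after the loop
-- (token += ch.upper() is token ++ [upperChar ch]: exact on the ASCII domain, where
-- a single character uppercases to a single character)
def scanGo (note_list : List String) (idx : Int) :
    List Char → List Char → List String → List String
  | [], token, result => result ++ [chordOf note_list idx (String.ofList token)]
  | c :: cs, token, result =>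
      if c = '-' then
        scanGo note_list idx cs [] (result ++ [chordOf note_list idx (String.ofList token)])
      else
        scanGo note_list idx cs (token ++ [PySem.Chars.upperChar c]) result

def generate_progression_alt (key : String) (pattern : String) (use_sharp : Bool) : List String :=
  let note_list := if use_sharp then NOTE_LIST_SHARP else NOTE_LIST_FLAT
  if !(note_list.contains key) then ["Key '" ++ key ++ "' tidak valid"]
  else
    let idx : Int := ((PySem.List.index? note_list key).getD 0 : Nat)
    scanGo note_list idx pattern.toList [] []

-- ===== PRECONDITION & SPEC =====
def Spec_generate_progression (key : String) (pattern : String) (use_sharp : Bool) (out : List String) : Prop := out = generate_progression_alt key pattern use_sharp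
instance (key : String) (pattern : String) (use_sharp : Bool) (out : List String) : Decidable (Spec_generate_progression key pattern use_sharp out) := by unfold Spec_generate_progression; infer_instance

-- ===== CLAIM (what is proved, stated in full; the proofs are below) =====
def Claim_equal_generate_progression : Prop := ∀ (key : String) (pattern : String) (use_sharp : Bool), Dom_generate_progression key pattern use_sharp → Spec_generate_progression key pattern use_sharp (generate_progression key pattern use_sharp)

-- ===== LEMMAS AND PROOFS =====

theorem ROMAN_items : ROMAN_NUMERALS = PySem.Dict.mk [("I", 0), ("II", 2), ("III", 4), ("IV", 5), ("V", 7), ("VI", 9), ("VII", 11)] := by decide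

theorem DEGREES_items : DEGREES = PySem.Dict.mk [("I", (0, "mayor")), ("II", (2, "minor")), ("III", (4, "minor")),
    ("IV", (5, "mayor")), ("V", (7, "mayor")), ("VI", (9, "minor")), ("VII", (11, "diminished"))] := by decide

-- A's loop step equals appending B's chordOf, for any note_list, idx and accumulator.
theorem step_eq (note_list : List String) (idx : Int) (acc : List String) (roman : String) :
    (if ROMAN_NUMERALS.contains roman then
      acc ++ [PySem.List.pyGetD
        (([0, 2, 4, 5, 7, 9, 11] : List Int).map
          (fun x => PySem.List.pyGetD note_list (PySem.Int.mod (idx + x) 12) ""))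
        (((PySem.List.index? ROMAN_NUMERALS.keys roman).getD 0 : Nat) : Int) ""
        ++ (" (" ++ PySem.List.pyGetD CHORDS_MAJOR (((PySem.List.index? ROMAN_NUMERALS.keys roman).getD 0 : Nat) : Int) "" ++ ")")]
     else acc ++ ["? (" ++ roman ++ ")"])
    = acc ++ [chordOf note_list idx roman] := by
  by_cases h1 : roman = "I"
  · subst h1; rfl
  by_cases h2 : roman = "II"
  · subst h2; rfl
  by_cases h3 : roman = "III"
  · subst h3; rfl
  by_cases h4 : roman = "IV"
  · subst h4; rfl
  by_cases h5 : roman = "V"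
  · subst h5; rfl
  by_cases h6 : roman = "VI"
  · subst h6; rfl
  by_cases h7 : roman = "VII"
  · subst h7; rfl
  have hc : ROMAN_NUMERALS.contains roman = false := by
    rw [ROMAN_items, PySem.Dict.contains_mk]
    simp [Ne.symm h1, Ne.symm h2, Ne.symm h3, Ne.symm h4, Ne.symm h5, Ne.symm h6, Ne.symm h7]
  have hg : DEGREES.get? roman = none := by
    rw [DEGREES_items]
    simp [PySem.Dict.get?,
      Ne.symm h1, Ne.symm h2, Ne.symm h3, Ne.symm h4, Ne.symm h5, Ne.symm h6, Ne.symm h7]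
  simp [hc, chordOf, hg]

-- structural specification of splitting a char list on '-' (proof-only helper)
def splitDash : List Char → List (List Char)
  | [] => [[]]
  | c :: cs => if c = '-' then [] :: splitDash cs else (splitDash cs).modifyHead (c :: ·)

theorem splitDash_ne_nil (l : List Char) : splitDash l ≠ [] := by
  induction l with
  | nil => simp [splitDash]
  | cons c cs ih =>
      simp only [splitDash]
      split
      · simp
      · obtain ⟨t, ts, hts⟩ := List.exists_cons_of_ne_nil ih
        simp [hts, List.modifyHead]

-- upperChar never produces '-' from another character
theorem upperChar_ne_dash (c : Char) (h : c ≠ '-') : PySem.Chars.upperChar c ≠ '-' := by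
  unfold PySem.Chars.upperChar PySem.Chars.islower
  split
  · next hlow =>
      simp only [Bool.and_eq_true, decide_eq_true_eq] at hlow
      intro habs
      have := congrArg Char.toNat habs
      have h97 : 97 ≤ c.toNat := hlow.1
      have h122 : c.toNat ≤ 122 := hlow.2
      have hv : (c.toNat - 32).isValidChar := Or.inl (by omega)
      rw [Char.toNat_ofNat, if_pos hv,
        show ('-' : Char).toNat = 45 from rfl] at this
      omega
  · exact h

theorem splitDash_go (fuel : Nat) (l cur : List Char) (acc : List (List Char))
    (h : l.length < fuel) :
    PySem.Chars.splitOn.go ['-'] fuel l cur acc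
      = acc.reverse ++ (splitDash l).modifyHead (cur.reverse ++ ·) := by
  induction fuel generalizing l cur acc with
  | zero => omega
  | succ n ih =>
      cases l with
      | nil => simp [PySem.Chars.splitOn.go, splitDash, List.modifyHead]
      | cons c cs =>
          by_cases hc : c = '-'
          · subst hc
            have : (['-'] : List Char).isPrefixOf ('-' :: cs) = true := by simp [List.isPrefixOf]
            rw [PySem.Chars.splitOn.go, if_pos this]
            rw [ih _ _ _ (by simpa using Nat.lt_of_succ_lt_succ h)]
            obtain ⟨t, ts, hts⟩ := List.exists_cons_of_ne_nil (splitDash_ne_nil cs)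
            simp [splitDash, hts, List.modifyHead]
          · have : (['-'] : List Char).isPrefixOf (c :: cs) = false := by
              simp only [List.isPrefixOf, Bool.and_eq_false_iff]
              exact Or.inl (beq_eq_false_iff_ne.mpr (Ne.symm hc))
            rw [PySem.Chars.splitOn.go, if_neg (by simp [this])]
            rw [ih _ _ _ (by simpa using Nat.lt_of_succ_lt_succ h)]
            congr 1
            simp only [splitDash, if_neg hc]
            obtain ⟨t, ts, hts⟩ := List.exists_cons_of_ne_nil (splitDash_ne_nil cs)
            simp [hts, List.modifyHead]

theorem splitOn_eq_splitDash (l : List Char) :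
    PySem.Chars.splitOn l ['-'] = splitDash l := by
  unfold PySem.Chars.splitOn
  rw [splitDash_go _ _ _ _ (by omega)]
  obtain ⟨t, ts, hts⟩ := List.exists_cons_of_ne_nil (splitDash_ne_nil l)
  simp [hts, List.modifyHead]

theorem splitDash_append (tok l : List Char) (h : '-' ∉ tok) :
    splitDash (tok ++ l) = (splitDash l).modifyHead (tok ++ ·) := by
  induction tok with
  | nil =>
      obtain ⟨t, ts, hts⟩ := List.exists_cons_of_ne_nil (splitDash_ne_nil l)
      simp [hts, List.modifyHead]
  | cons c cs ih =>
      have hc : c ≠ '-' := by simp at h; exact fun hh => h.1 hh.symm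
      have hcs : '-' ∉ cs := by simp at h; exact h.2
      simp only [List.cons_append, splitDash, if_neg hc, ih hcs]
      obtain ⟨t, ts, hts⟩ := List.exists_cons_of_ne_nil (splitDash_ne_nil l)
      simp [hts, List.modifyHead]

-- B's scanner over raw chars equals mapping chordOf over the dash-split of the uppercased chars
theorem scanGo_eq (note_list : List String) (idx : Int) (cs tok : List Char)
    (res : List String) (htok : '-' ∉ tok) :
    scanGo note_list idx cs tok res
      = res ++ (splitDash (tok ++ cs.map PySem.Chars.upperChar)).map
          (fun t => chordOf note_list idx (String.ofList t)) := by
  induction cs generalizing tok res with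
  | nil =>
      have h1 : splitDash tok = [tok] := by
        simpa [splitDash, List.modifyHead] using splitDash_append tok [] htok
      simp [scanGo, h1]
  | cons c cs ih =>
      by_cases hc : c = '-'
      · subst hc
        rw [scanGo, if_pos rfl, ih [] _ (by simp)]
        have hup : PySem.Chars.upperChar '-' = '-' := by decide
        simp only [List.map_cons, hup, splitDash_append tok _ htok, splitDash,
          if_pos rfl, List.modifyHead, List.map_cons, List.nil_append]
        simp
      · have hnd : '-' ∉ tok ++ [PySem.Chars.upperChar c] := by
          intro hm
          rcases List.mem_append.1 hm with h | h
          · exact htok h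
          · exact upperChar_ne_dash c hc (List.mem_singleton.1 h).symm
        rw [scanGo, if_neg hc, ih (tok ++ [PySem.Chars.upperChar c]) res hnd]
        simp

-- ===== VERDICT (by name: the statement is the Claim_ definition above) =====
theorem generate_progression_spec : Claim_equal_generate_progression := by
  intro key pattern use_sharp _
  unfold Spec_generate_progression generate_progression generate_progression_alt
  set note_list := if use_sharp then NOTE_LIST_SHARP else NOTE_LIST_FLAT with hnl
  by_cases hk : note_list.contains key = true
  · simp only [hk, Bool.not_true, Bool.false_eq_true, if_false]
    set idx : Int := (((PySem.List.index? note_list key).getD 0 : Nat) : Int) with hidx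
    -- A's foldl = map chordOf over the split tokens
    rw [PySem.List.foldl_congr_mem _ _
        (fun (acc : List String) (roman : String) => acc ++ [chordOf note_list idx roman]) _
        (fun acc roman _ => step_eq note_list idx acc roman),
      PySem.List.foldl_append_singleton_eq_map, List.nil_append]
    -- B's scanner = map chordOf over splitDash of the uppercased chars
    rw [scanGo_eq note_list idx pattern.toList [] [] (by simp), List.nil_append, List.nil_append]
    -- relate A's String-level split to splitDash
    have hsplit := PySem.Str.split?_map (PySem.Str.upper pattern) "-"
    have hchars : PySem.Chars.split? (PySem.Str.upper pattern).toList ("-").toList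
        = some (PySem.Chars.splitOn (PySem.Str.upper pattern).toList ['-']) := by
      simp [PySem.Chars.split?]
    rw [hchars] at hsplit
    obtain ⟨ts, hts, htl⟩ : ∃ ts, PySem.Str.split? (PySem.Str.upper pattern) "-" = some ts ∧
        ts.map String.toList = PySem.Chars.splitOn (PySem.Str.upper pattern).toList ['-'] := by
      cases h : PySem.Str.split? (PySem.Str.upper pattern) "-" with
      | none => rw [h] at hsplit; simp at hsplit
      | some ts => rw [h] at hsplit; exact ⟨ts, rfl, by simpa using hsplit⟩
    rw [hts, Option.getD_some]
    have : List.map (chordOf note_list idx) ts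
        = (ts.map String.toList).map (fun t => chordOf note_list idx (String.ofList t)) := by
      rw [List.map_map]; congr 1
      funext s
      simp [Function.comp, String.ofList_toList]
    rw [this, htl, splitOn_eq_splitDash, PySem.Str.toList_upper, PySem.Chars.upper]
  · simp only [Bool.not_eq_true] at hk
    simp only [hk, Bool.not_false, if_true]
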